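-- pv_equiv track=rewrite | github.com/linux-netdev/ml-stat | stat-print.py | age_histogram_bucketize
-- ===== SOURCE A (Python) =====
-- def age_histogram_bucketize(months, histogram):
--     left = months
--     i = 3
--     while len(left):
--         months = left
--         left = []
--         histogram[i] = 0
--         for m in months:
--             if m < i:
--                 histogram[i] += 1
--             else:
--                 left.append(m)
--         if i < 24:
--             i *= 2
--         else:
--             i += 24
--     return histogram
-- ===== SOURCE B (Python) =====
-- from collections import Counter
--
--
-- def _bucket(m):
--     # smallest threshold in 3, 6, 12, 24, 48, 72, ... strictly greater than m
--     if m < 3: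
--         return 3
--     if m < 6:
--         return 6
--     if m < 12:
--         return 12
--     return 24 * (m // 24 + 1)
--
--
-- def age_histogram_bucketize(months, histogram):
--     if not months:
--         return histogram
--     buckets = [_bucket(m) for m in months]
--     counts = Counter(buckets)
--     maxb = max(buckets)
--     t = 3
--     while t <= maxb:
--         histogram[t] = counts.get(t, 0)
--         t = t * 2 if t < 24 else t + 24
--     return histogram
-- ===== Notes on version B (the rewrite author's own statement) =====
-- stated objective: faster
-- what changed: Instead of A's while-loop that rescans the surviving list once per threshold bucket, B computes each element's bucket directly by closed form in one pass, tallies them in a Counter, and then fills the threshold sequence 3,6,12,24,48,... up to the maximum bucket with the counted (or zero) values.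
import Mathlib
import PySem

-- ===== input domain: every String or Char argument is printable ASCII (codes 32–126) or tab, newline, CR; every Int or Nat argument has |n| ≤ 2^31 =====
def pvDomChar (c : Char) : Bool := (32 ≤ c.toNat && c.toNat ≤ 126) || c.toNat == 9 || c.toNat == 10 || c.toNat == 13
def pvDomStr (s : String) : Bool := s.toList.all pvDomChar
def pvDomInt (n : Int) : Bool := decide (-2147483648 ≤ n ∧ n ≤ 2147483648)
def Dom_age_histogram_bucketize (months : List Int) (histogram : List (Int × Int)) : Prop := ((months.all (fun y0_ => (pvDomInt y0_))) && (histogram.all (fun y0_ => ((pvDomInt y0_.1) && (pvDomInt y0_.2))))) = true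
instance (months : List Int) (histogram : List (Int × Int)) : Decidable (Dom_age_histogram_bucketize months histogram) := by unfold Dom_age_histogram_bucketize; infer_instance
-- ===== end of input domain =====

-- B replaces A's per-bucket rescans of the surviving list with one closed-form bucket
-- computation per element plus a Counter, then fills the threshold sequence once (faster).

-- closed form for B: the smallest threshold in 3, 6, 12, 24, 48, 72, … strictly greater than m
def pvBucket (m : Int) : Int :=
  if m < 3 then 3
  else if m < 6 then 6
  else if m < 12 then 12
  else 24 * (PySem.Int.floordiv m 24 + 1)

-- needed by pvLoopA's termination measure
theorem pvBucket_lt (m : Int) : m < pvBucket m := by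
  unfold pvBucket
  split_ifs <;> try omega
  have h1 := PySem.Int.floordiv_mul_add_mod m 24
  have h2 := PySem.Int.mod_nonneg m (b := 24) (by norm_num)
  have h3 := PySem.Int.mod_lt m (b := 24) (by norm_num)
  omega

-- ===== PORT A =====
-- the inner `for m in months:` loop of A; state = (left, histogram)
def pvInnerA (i : Int) (ms : List Int) (left : List Int) (hist : PySem.Dict Int Int) :
    List Int × PySem.Dict Int Int :=
  ms.foldl (fun st m =>
    if m < i then (st.1, st.2.modify i 0 (· + 1))
    else (st.1 ++ [m], st.2)) (left, hist)

theorem pvInnerA_fst (i : Int) (ms : List Int) : ∀ (left : List Int) (hist : PySem.Dict Int Int),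
    (pvInnerA i ms left hist).1 = left ++ ms.filter (fun m => !decide (m < i)) := by
  induction ms with
  | nil => intro left hist; simp [pvInnerA]
  | cons m ms ih =>
    intro left hist
    by_cases hm : m < i
    · have hstep : pvInnerA i (m :: ms) left hist
          = pvInnerA i ms left (hist.modify i 0 (· + 1)) := by
        simp [pvInnerA, List.foldl_cons, hm]
      rw [hstep, ih, List.filter_cons_of_neg (by simp [hm])]
    · have hstep : pvInnerA i (m :: ms) left hist
          = pvInnerA i ms (left ++ [m]) hist := by
        simp [pvInnerA, List.foldl_cons, hm]
      rw [hstep, ih, List.filter_cons_of_pos (by simp [hm])]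
      simp

-- termination measure for A's while loop
def pvMeas (left : List Int) (i : Int) : Nat :=
  (left.map (fun m => (pvBucket m + 24 - i).toNat + 1)).sum

theorem pvMeas_cons (y : Int) (l : List Int) (j : Int) :
    pvMeas (y :: l) j = ((pvBucket y + 24 - j).toNat + 1) + pvMeas l j := by
  simp [pvMeas]

theorem pvMeas_le (l : List Int) (i i' : Int) (hi : i < i') :
    pvMeas (l.filter (fun m => !decide (m < i))) i' ≤ pvMeas l i := by
  induction l with
  | nil => simp [pvMeas]
  | cons x xs ih =>
    by_cases hx : x < i
    · rw [List.filter_cons_of_neg (by simp [hx]), pvMeas_cons]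
      omega
    · rw [List.filter_cons_of_pos (by simp [hx]), pvMeas_cons, pvMeas_cons]
      have hb := pvBucket_lt x
      have hterm : (pvBucket x + 24 - i').toNat ≤ (pvBucket x + 24 - i).toNat := by omega
      omega

theorem pvMeas_step (left : List Int) (i : Int) (hi : 1 ≤ i) (h : left ≠ []) :
    pvMeas (left.filter (fun m => !decide (m < i))) (if i < 24 then i * 2 else i + 24)
      < pvMeas left i := by
  have hi' : i < if i < 24 then i * 2 else i + 24 := by split <;> omega
  cases left with
  | nil => exact absurd rfl h
  | cons x xs =>
    have htail := pvMeas_le xs i (if i < 24 then i * 2 else i + 24) hi'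
    by_cases hx : x < i
    · rw [List.filter_cons_of_neg (by simp [hx]), pvMeas_cons]
      omega
    · rw [List.filter_cons_of_pos (by simp [hx]), pvMeas_cons, pvMeas_cons]
      have hb := pvBucket_lt x
      have hxi : i ≤ x := by omega
      have hterm : (pvBucket x + 24 - (if i < 24 then i * 2 else i + 24)).toNat
          < (pvBucket x + 24 - i).toNat := by omega
      omega

theorem pvNext_pos {i : Int} (hi : 1 ≤ i) : 1 ≤ (if i < 24 then i * 2 else i + 24) := by
  split <;> omega

theorem pvLoopA_dec (left : List Int) (i : Int) (hist : PySem.Dict Int Int) (hi : 1 ≤ i)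
    (h : ¬ left = []) :
    pvMeas (pvInnerA i left [] (hist.insert i 0)).1 (if i < 24 then i * 2 else i + 24)
      < pvMeas left i := by
  rw [pvInnerA_fst, List.nil_append]
  exact pvMeas_step left i hi h

-- A's while loop
def pvLoopA (left : List Int) (i : Int) (hist : PySem.Dict Int Int) (hi : 1 ≤ i) :
    PySem.Dict Int Int :=
  if h : left = [] then hist
  else
    let st := pvInnerA i left [] (hist.insert i 0)
    pvLoopA st.1 (if i < 24 then i * 2 else i + 24) st.2 (pvNext_pos hi)
termination_by pvMeas left i
decreasing_by exact pvLoopA_dec left i hist hi h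

def age_histogram_bucketize (months : List Int) (histogram : List (Int × Int)) :
    List (Int × Int) :=
  (pvLoopA months 3 (PySem.Dict.mk histogram) (by norm_num)).items

-- ===== PORT B =====
theorem pvFillB_dec (t maxb : Int) (ht : 1 ≤ t) (h : t ≤ maxb) :
    (maxb + 1 - (if t < 24 then t * 2 else t + 24)).toNat < (maxb + 1 - t).toNat := by
  split <;> omega

-- B's `while t <= maxb:` fill loop
def pvFillB (t : Int) (maxb : Int) (counts : PySem.Dict Int Int) (hist : PySem.Dict Int Int)
    (ht : 1 ≤ t) : PySem.Dict Int Int :=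
  if h : t ≤ maxb then
    pvFillB (if t < 24 then t * 2 else t + 24) maxb counts
      (hist.insert t (counts.getD t 0)) (pvNext_pos ht)
  else hist
termination_by (maxb + 1 - t).toNat
decreasing_by exact pvFillB_dec t maxb ht h

def age_histogram_bucketize_alt (months : List Int) (histogram : List (Int × Int)) :
    List (Int × Int) :=
  if months = [] then histogram
  else
    let buckets := months.map pvBucket
    let counts := PySem.Dict.counter buckets
    match PySem.List.max? buckets (fun x => x) with
    | none => histogram  -- unreachable: buckets is nonempty here
    | some maxb => (pvFillB 3 maxb counts (PySem.Dict.mk histogram) (by norm_num)).items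

-- ===== PRECONDITION & SPEC =====
def Spec_age_histogram_bucketize (months : List Int) (histogram : List (Int × Int)) (out : List (Int × Int)) : Prop := out = age_histogram_bucketize_alt months histogram
instance (months : List Int) (histogram : List (Int × Int)) (out : List (Int × Int)) : Decidable (Spec_age_histogram_bucketize months histogram out) := by unfold Spec_age_histogram_bucketize; infer_instance

-- ===== CLAIM =====
def Claim_equal_age_histogram_bucketize : Prop := ∀ (months : List Int) (histogram : List (Int × Int)), Dom_age_histogram_bucketize months histogram → Spec_age_histogram_bucketize months histogram (age_histogram_bucketize months histogram)

-- ===== LEMMAS AND PROOFS =====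

-- the set of values A's loop variable i ranges over
def PvThresh (t : Int) : Prop := t = 3 ∨ t = 6 ∨ t = 12 ∨ (24 ≤ t ∧ 24 ∣ t)

theorem pvThresh_pos {t : Int} (h : PvThresh t) : 3 ≤ t := by
  rcases h with h | h | h | ⟨h, -⟩ <;> omega

theorem pvBucket_thresh (m : Int) : PvThresh (pvBucket m) := by
  unfold pvBucket PvThresh
  split_ifs with h1 h2 h3
  · left; rfl
  · right; left; rfl
  · right; right; left; rfl
  · right; right; right
    have h1 := PySem.Int.floordiv_mul_add_mod m 24
    have h2 := PySem.Int.mod_nonneg m (b := 24) (by norm_num)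
    have h3 := PySem.Int.mod_lt m (b := 24) (by norm_num)
    exact ⟨by omega, ⟨PySem.Int.floordiv m 24 + 1, rfl⟩⟩

theorem pvBucket_le {i : Int} (hT : PvThresh i) {m : Int} (h : m < i) : pvBucket m ≤ i := by
  have h1 := PySem.Int.floordiv_mul_add_mod m 24
  have h2 := PySem.Int.mod_nonneg m (b := 24) (by norm_num)
  have h3 := PySem.Int.mod_lt m (b := 24) (by norm_num)
  rcases hT with rfl | rfl | rfl | ⟨h24, k, rfl⟩ <;> unfold pvBucket <;> split_ifs <;> omega

theorem pvThresh_step {a b : Int} (ha : PvThresh a) (hb : PvThresh b) (hab : a < b) :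
    (if a < 24 then a * 2 else a + 24) ≤ b := by
  rcases ha with rfl | rfl | rfl | ⟨ha24, j, rfl⟩ <;>
    rcases hb with rfl | rfl | rfl | ⟨hb24, k, rfl⟩ <;>
    split_ifs <;> omega

theorem pvThresh_next {t : Int} (h : PvThresh t) :
    PvThresh (if t < 24 then t * 2 else t + 24) := by
  rcases h with rfl | rfl | rfl | ⟨h24, k, rfl⟩
  · right; left; norm_num
  · right; right; left; norm_num
  · right; right; right; norm_num
  · right; right; right
    rw [if_neg (by omega)]
    exact ⟨by omega, ⟨k + 1, by ring⟩⟩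

theorem pvInnerA_snd (i : Int) (ms : List Int) :
    ∀ (left : List Int) (d : PySem.Dict Int Int) (c : Int),
    (pvInnerA i ms left (d.insert i c)).2
      = d.insert i (c + (ms.countP (fun m => decide (m < i)) : Int)) := by
  induction ms with
  | nil => intro left d c; simp [pvInnerA]
  | cons m ms ih =>
    intro left d c
    by_cases hm : m < i
    · have hstep : ((d.insert i c).modify i 0 (· + 1)) = d.insert i (c + 1) := by
        unfold PySem.Dict.modify
        rw [PySem.Dict.getD_insert_self, PySem.Dict.insert_insert_self]
      calc (pvInnerA i (m :: ms) left (d.insert i c)).2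
          = (pvInnerA i ms left (d.insert i (c + 1))).2 := by
            simp [pvInnerA, List.foldl_cons, hm, hstep]
        _ = d.insert i (c + 1 + (ms.countP (fun m => decide (m < i)) : Int)) := ih _ _ _
        _ = d.insert i (c + ((m :: ms).countP (fun m => decide (m < i)) : Int)) := by
            rw [List.countP_cons]; simp [hm]; ring_nf
    · calc (pvInnerA i (m :: ms) left (d.insert i c)).2
          = (pvInnerA i ms (left ++ [m]) (d.insert i c)).2 := by
            simp [pvInnerA, List.foldl_cons, hm]
        _ = d.insert i (c + (ms.countP (fun m => decide (m < i)) : Int)) := ih _ _ _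
        _ = d.insert i (c + ((m :: ms).countP (fun m => decide (m < i)) : Int)) := by
            rw [List.countP_cons]; simp [hm]

-- the surviving list after processing threshold i is exactly the elements whose bucket is above i
theorem pvFilter_step (months : List Int) {i : Int} (hT : PvThresh i) :
    (months.filter (fun m => decide (i ≤ pvBucket m))).filter (fun m => !decide (m < i))
      = months.filter (fun m => decide ((if i < 24 then i * 2 else i + 24) ≤ pvBucket m)) := by
  rw [List.filter_filter]
  apply List.filter_congr
  intro m _
  have hlt := pvBucket_lt m
  have hi' : i < if i < 24 then i * 2 else i + 24 := by
    have := pvThresh_pos hT; split <;> omega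
  by_cases hb : (if i < 24 then i * 2 else i + 24) ≤ pvBucket m
  · simp only [hb, decide_true]
    have h1 : i ≤ pvBucket m := by omega
    have h2 : ¬ m < i := fun hc => absurd (pvBucket_le hT hc) (by omega)
    simp [h1, h2]
  · simp only [hb, decide_false]
    by_cases h1 : i ≤ pvBucket m
    · have h2 : m < i := by
        by_contra hc
        have hne : pvBucket m ≠ i := fun he => by omega
        exact hb (pvThresh_step hT (pvBucket_thresh m) (by omega))
      simp [h2]
    · simp [h1]

-- the number of elements A counts at threshold i is B's counter value at key i
theorem pvCount_step (months : List Int) {i : Int} (hT : PvThresh i) :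
    ((months.filter (fun m => decide (i ≤ pvBucket m))).countP (fun m => decide (m < i)) : Int)
      = (PySem.Dict.counter (months.map pvBucket)).getD i 0 := by
  rw [PySem.Dict.getD_counter, List.count_eq_countP, List.countP_map, List.countP_filter]
  congr 1
  apply List.countP_congr
  intro m _
  have hlt := pvBucket_lt m
  by_cases hbi : pvBucket m = i
  · have hmi : m < i := by omega
    simp [Function.comp, hbi, hmi]
  · by_cases hmi : m < i
    · have hble := pvBucket_le hT hmi
      have h2 : ¬ i ≤ pvBucket m := by omega
      simp [Function.comp, hbi, hmi, h2]
    · simp [Function.comp, hbi, hmi]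

-- both loops return hist once i has passed every bucket
theorem pv_done (months : List Int) (maxb : Int)
    (hmax : PySem.List.max? (months.map pvBucket) (fun x => x) = some maxb)
    (i : Int) (hist counts : PySem.Dict Int Int) (hi : 1 ≤ i) (hgt : maxb < i) :
    pvLoopA (months.filter (fun m => decide (i ≤ pvBucket m))) i hist hi
      = pvFillB i maxb counts hist hi := by
  have hnil : months.filter (fun m => decide (i ≤ pvBucket m)) = [] := by
    rw [List.filter_eq_nil_iff]
    intro m hm
    have := PySem.List.max?_isMax hmax (pvBucket m) (List.mem_map_of_mem hm)
    simp only [decide_eq_true_eq]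
    omega
  rw [pvLoopA, dif_pos hnil, pvFillB, dif_neg (by omega)]

-- lockstep equality of A's while loop with B's fill loop
theorem pv_main (months : List Int) (maxb : Int)
    (hmax : PySem.List.max? (months.map pvBucket) (fun x => x) = some maxb) :
    ∀ (k : Nat) (i : Int), PvThresh i → ∀ (hist : PySem.Dict Int Int)
      (hk : (maxb + 1 - i).toNat ≤ k) (hi : 1 ≤ i),
    pvLoopA (months.filter (fun m => decide (i ≤ pvBucket m))) i hist hi
      = pvFillB i maxb (PySem.Dict.counter (months.map pvBucket)) hist hi := by
  intro k
  induction k with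
  | zero =>
    intro i hT hist hk hi
    exact pv_done months maxb hmax i hist _ hi (by omega)
  | succ k ih =>
    intro i hT hist hk hi
    by_cases hle : i ≤ maxb
    · -- both loops take one step
      have hmem : maxb ∈ months.map pvBucket := PySem.List.max?_mem hmax
      obtain ⟨m₀, hm₀, hbm₀⟩ := List.mem_map.mp hmem
      have hLne : months.filter (fun m => decide (i ≤ pvBucket m)) ≠ [] := by
        intro hc
        have : m₀ ∈ months.filter (fun m => decide (i ≤ pvBucket m)) :=
          List.mem_filter.mpr ⟨hm₀, by simp only [decide_eq_true_eq]; omega⟩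
        rw [hc] at this; exact absurd this (List.not_mem_nil)
      rw [pvLoopA, dif_neg hLne, pvFillB, dif_pos hle]
      have hfst := pvInnerA_fst i (months.filter (fun m => decide (i ≤ pvBucket m))) []
        (hist.insert i 0)
      have hsnd := pvInnerA_snd i (months.filter (fun m => decide (i ≤ pvBucket m))) []
        hist 0
      have hi3 := pvThresh_pos hT
      have hi' : 1 ≤ if i < 24 then i * 2 else i + 24 := by split_ifs <;> omega
      have hstep : i + 1 ≤ if i < 24 then i * 2 else i + 24 := by split_ifs <;> omega
      simp only [hfst, hsnd, List.nil_append, zero_add]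
      rw [pvFilter_step months hT, pvCount_step months hT]
      exact ih (if i < 24 then i * 2 else i + 24) (pvThresh_next hT) _ (by omega) hi'
    · exact pv_done months maxb hmax i hist _ hi (by omega)

-- ===== VERDICT =====
theorem age_histogram_bucketize_spec : Claim_equal_age_histogram_bucketize := by
  intro months histogram _
  unfold Spec_age_histogram_bucketize
  cases months with
  | nil =>
    rw [age_histogram_bucketize, age_histogram_bucketize_alt, pvLoopA]
    simp
  | cons m ms =>
    obtain ⟨maxb, hmax⟩ : ∃ maxb,
        PySem.List.max? ((m :: ms).map pvBucket) (fun x => x) = some maxb := by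
      cases h : PySem.List.max? ((m :: ms).map pvBucket) (fun x => x) with
      | none => rw [PySem.List.max?_eq_none_iff] at h; simp at h
      | some maxb => exact ⟨maxb, rfl⟩
    have hall : (m :: ms).filter (fun x => decide ((3 : Int) ≤ pvBucket x)) = m :: ms := by
      rw [List.filter_eq_self]
      intro x _
      simpa using pvThresh_pos (pvBucket_thresh x)
    rw [age_histogram_bucketize, age_histogram_bucketize_alt, if_neg (by simp)]
    simp only [hmax]
    have hmain := pv_main (m :: ms) maxb hmax (maxb + 1 - 3).toNat 3 (Or.inl rfl)
      (PySem.Dict.mk histogram) (by omega) (by norm_num)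
    rw [hall] at hmain
    exact congrArg PySem.Dict.items hmain
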